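-- pv_equiv track=rewrite | github.com/wasanbon/wasanbon | wasanbon/core/plugins/admin/idlcompiler_plugin/dart_converter.py | _default_value
-- ===== SOURCE A (Python) =====
-- double_types = ['double', 'long double', 'float']
--
-- def _default_value(n):
--     if n.find('[') > 0:
--         primitive_type = n[:n.find('[')]
--         inner_type = primitive_type + n[n.find(']') + 1:]
--         num_elem = int(n[n.find('[') + 1:n.find(']')])
--         s = '['
--         for i in range(num_elem):
--             s = s + _default_value(inner_type)
--             if i != num_elem - 1:
--                 s = s + ', '
--         s = s + ']'
--         return s
--     elif n in double_types:
--         return "0.0"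
--     elif n == 'string' or n == 'wstring':
--         return '""'
--     elif n == 'boolean':
--         return "false"
--     else:
--         return "0"
--     return "__ERROR__"
-- ===== SOURCE B (Python) =====
-- # B: parse the bracket dimensions once with a single left-to-right scan, then
-- # build the result by folding the dimension list innermost-first (alternative
-- # decomposition: one parse + fold instead of per-dimension recursion on a
-- # reconstructed string).
-- double_types = ['double', 'long double', 'float']
--
--
-- def _scalar(t):
--     if t in double_types:
--         return "0.0"
--     elif t == 'string' or t == 'wstring':
--         return '""'
--     elif t == 'boolean':
--         return "false"
--     else:
--         return "0"
--
--
-- def _default_value(n):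
--     i = n.find('[')
--     if i <= 0:
--         return _scalar(n)
--     base = n[:i]
--     rest = n[i:]
--     dims = []
--     while '[' in rest:
--         j = rest.find(']')
--         if j < 0:
--             raise ValueError('unterminated [ in type: ' + n)
--         k = rest.find('[')
--         base += rest[:k]
--         dims.append(int(rest[k + 1:j]))
--         rest = rest[j + 1:]
--     base += rest
--     out = _scalar(base)
--     for d in reversed(dims):
--         out = '[' + ', '.join([out] * d) + ']'
--     return out
-- ===== Notes on version B (the rewrite author's own statement) =====
-- stated objective: alternative
-- what changed: Replaces A's per-dimension recursion on a reconstructed type string (re-running find/slice from the start at every level) with a single left-to-right parse that collects the base type and all bracket dimensions once, followed by an innermost-first fold wrapping the scalar default.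
-- outside the precondition, e.g. on _default_value('a[0]x['): A returns '[]', B raises ValueError; on _default_value('1[0]+['): A returns '[]', B raises ValueError
import Mathlib
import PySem

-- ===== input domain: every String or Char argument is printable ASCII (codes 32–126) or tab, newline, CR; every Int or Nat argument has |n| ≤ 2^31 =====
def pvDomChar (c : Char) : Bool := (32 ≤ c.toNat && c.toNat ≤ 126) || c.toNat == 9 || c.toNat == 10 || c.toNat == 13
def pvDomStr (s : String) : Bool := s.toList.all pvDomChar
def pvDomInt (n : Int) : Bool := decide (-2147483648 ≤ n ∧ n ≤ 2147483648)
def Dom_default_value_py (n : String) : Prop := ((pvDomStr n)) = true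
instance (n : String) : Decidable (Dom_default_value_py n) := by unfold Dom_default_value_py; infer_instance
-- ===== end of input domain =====

-- B replaces A's per-dimension recursion on a reconstructed string by one parse of all
-- bracket dimensions plus an innermost-first fold (alternative decomposition, same results).

-- ===== PORT A =====
-- A recurses on a string it rebuilds; on invalid inputs (all excluded by Pre_) the Python can
-- even grow that string and hit the recursion limit, so the port carries a fuel counter
-- (n.length + 1 suffices on every input Pre_ admits; fuel exhaustion and the int() failure
-- branch return junk on excluded inputs only).
def dvAgo : Nat → List Char → List Char
  | 0, _ => []                       -- Python A exceeds the recursion limit here (outside Pre_)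
  | fuel+1, n =>
    let f1 := PySem.Chars.find n ['[']
    if f1 > 0 then
      let prim := PySem.Chars.slice n none (some f1)
      let f2 := PySem.Chars.find n [']']
      let inner := prim ++ PySem.Chars.slice n (some (f2+1)) none
      match PySem.Int.ofChars? (PySem.Chars.slice n (some (f1+1)) (some f2)) with
      | none => []                   -- Python raises ValueError here (outside Pre_)
      | some ne =>
        ((PySem.List.pyRange 0 ne 1).foldl (fun s i =>
            let s' := s ++ dvAgo fuel inner
            if i ≠ ne - 1 then s' ++ [',', ' '] else s') ['[']) ++ [']']
    else if n = "double".toList ∨ n = "long double".toList ∨ n = "float".toList then "0.0".toList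
    else if n = "string".toList ∨ n = "wstring".toList then ['"', '"']
    else if n = "boolean".toList then "false".toList
    else "0".toList

def default_value_py (n : String) : String := String.ofList (dvAgo (n.toList.length + 1) n.toList)

-- ===== PORT B =====
def dvScalar (t : List Char) : List Char :=
  if t = "double".toList ∨ t = "long double".toList ∨ t = "float".toList then "0.0".toList
  else if t = "string".toList ∨ t = "wstring".toList then ['"', '"']
  else if t = "boolean".toList then "false".toList
  else "0".toList

def parseB (base rest : List Char) (dims : List Int) : Option (List Char × List Int) :=
  if hin : PySem.Chars.isIn ['['] rest = true then
    let j := PySem.Chars.find rest [']']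
    if hj : j < 0 then none          -- Source B raises ValueError here (outside Pre_)
    else
      let k := PySem.Chars.find rest ['[']
      match PySem.Int.ofChars? (PySem.Chars.slice rest (some (k+1)) (some j)) with
      | none => none                 -- int() raises ValueError (outside Pre_)
      | some d =>
        parseB (base ++ PySem.Chars.slice rest none (some k))
               (PySem.Chars.slice rest (some (j+1)) none) (dims ++ [d])
  else some (base ++ rest, dims)
termination_by rest.length
decreasing_by
  simp only [PySem.Chars.slice_eq_listSlice]
  rw [PySem.List.slice_from rest (a := PySem.Chars.find rest [']'] + 1) (by omega)]
  have hne : rest ≠ [] := by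
    intro h; subst h
    obtain ⟨s, t, he⟩ := (PySem.Chars.isIn_iff_infix _ _).mp hin
    simp at he
  have := List.length_pos_iff.mpr hne
  simp [List.length_drop]; omega

def wrapDim (out : List Char) (dd : Int) : List Char :=
  '[' :: (PySem.Chars.join [',', ' '] (List.replicate dd.toNat out) ++ [']'])

def default_value_py_alt (n : String) : String :=
  let cs := n.toList
  let i := PySem.Chars.find cs ['[']
  if i ≤ 0 then String.ofList (dvScalar cs)
  else
    match parseB (PySem.Chars.slice cs none (some i)) (PySem.Chars.slice cs (some i) none) [] with
    | none => ""                     -- Source B raises here (outside Pre_)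
    | some (b, ds) => String.ofList (ds.reverse.foldl wrapDim (dvScalar b))

-- ===== PRECONDITION & SPEC =====
-- Grammar check for A's returning inputs: a bracket-free head segment, then '['<int>']'
-- groups separated by ']'-free text, then a '['-free tail (stray ']' allowed only in the tail).
mutual
def scanSeg : List Char → Bool
  | [] => true
  | c :: r => if c = '[' then scanGrp [] r else if c = ']' then scanTail r else scanSeg r
def scanGrp : List Char → List Char → Bool
  | _, [] => false
  | acc, c :: r => if c = ']' then (PySem.Int.ofChars? acc).isSome && scanSeg r else scanGrp (acc ++ [c]) r
def scanTail : List Char → Bool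
  | [] => true
  | c :: r => if c = '[' then false else scanTail r
end

-- Pre_ excludes the inputs where A raises ValueError (or exceeds the recursion limit), and
-- the inputs where a dimension ≤ 0 lets A return an empty list literal without validating the malformed
-- bracket text behind it — there B naturally validates the whole type and raises ValueError.
def Pre_default_value_py (n : String) : Prop :=
  n.toList.head? = some '[' ∨ scanSeg n.toList = true
instance (n : String) : Decidable (Pre_default_value_py n) := by
  unfold Pre_default_value_py; infer_instance

def pvWitness_default_value_py : String := "long double[3]"

def Spec_default_value_py (n : String) (out : String) : Prop := out = default_value_py_alt n
instance (n : String) (out : String) : Decidable (Spec_default_value_py n out) := by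
  unfold Spec_default_value_py; infer_instance

-- ===== CLAIM (what is proved, stated in full; the proofs are below) =====
def Claim_equal_default_value_py : Prop :=
  ∀ (n : String), Dom_default_value_py n → Pre_default_value_py n →
    Spec_default_value_py n (default_value_py n)

-- ===== LEMMAS AND PROOFS =====

lemma isIn_singleton_iff (c : Char) (l : List Char) :
    PySem.Chars.isIn [c] l = true ↔ c ∈ l := by
  rw [PySem.Chars.isIn_iff_infix]
  constructor
  · rintro ⟨s, t, rfl⟩; simp
  · intro h
    obtain ⟨s, t, rfl⟩ := List.mem_iff_append.mp h
    exact ⟨s, t, by simp⟩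

lemma find_char_eq (p r : List Char) (c : Char) (hc : c ∉ p) :
    PySem.Chars.find (p ++ c :: r) [c] = (p.length : Int) := by
  have hinf : [c] <:+: (p ++ c :: r) := ⟨p, r, by simp⟩
  have h0 : 0 ≤ PySem.Chars.find (p ++ c :: r) [c] := (PySem.Chars.find_nonneg_iff _ _).mpr hinf
  obtain ⟨hpre, hmin⟩ := PySem.Chars.find_spec h0
  set m := (PySem.Chars.find (p ++ c :: r) [c]).toNat with hm
  have hget : (p ++ c :: r)[m]? = some c := by
    obtain ⟨t, ht⟩ := hpre
    rw [← List.head?_drop, ← ht]; rfl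
  have hmle : ¬ p.length < m := by
    intro hlt
    exact hmin p.length hlt ⟨r, by simp⟩
  have hmge : ¬ m < p.length := by
    intro hlt
    have : (p ++ c :: r)[m]? = some p[m] := by
      rw [List.getElem?_append_left hlt]; simp [hlt]
    rw [this] at hget
    exact hc (by rw [Option.some_inj] at hget; rw [← hget]; exact List.getElem_mem _)
  have : m = p.length := by omega
  omega

lemma find_char_neg (l : List Char) (c : Char) (hc : c ∉ l) :
    PySem.Chars.find l [c] = -1 := by
  rw [PySem.Chars.find_eq_neg_one_iff]
  intro h
  obtain ⟨s, t, rfl⟩ := h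
  exact hc (by simp)

lemma scanSeg_clean_prefix (p r : List Char) (h1 : '[' ∉ p) (h2 : ']' ∉ p) :
    scanSeg (p ++ r) = scanSeg r := by
  induction p with
  | nil => rfl
  | cons c p ih =>
    simp only [List.mem_cons, not_or] at h1 h2
    rw [List.cons_append, scanSeg, if_neg (fun h => h1.1 h.symm), if_neg (fun h => h2.1 h.symm)]
    exact ih h1.2 h2.2

lemma scanTail_no_bracket (r : List Char) (h : scanTail r = true) : '[' ∉ r := by
  induction r with
  | nil => simp
  | cons c r ih =>
    rw [scanTail] at h
    by_cases hc : c = '['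
    · rw [if_pos hc] at h; exact absurd h (by simp)
    · rw [if_neg hc] at h
      simp only [List.mem_cons, not_or]
      exact ⟨fun he => hc he.symm, ih h⟩

lemma scanGrp_decomp (r : List Char) : ∀ acc, scanGrp acc r = true →
    ∃ d t, r = d ++ ']' :: t ∧ ']' ∉ d ∧
      (PySem.Int.ofChars? (acc ++ d)).isSome ∧ scanSeg t = true := by
  induction r with
  | nil => intro acc h; rw [scanGrp] at h; exact absurd h (by simp)
  | cons c r ih =>
    intro acc h
    rw [scanGrp] at h
    by_cases hc : c = ']'
    · rw [if_pos hc] at h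
      simp only [Bool.and_eq_true] at h
      exact ⟨[], r, by simp [hc], by simp, by simpa using h.1, h.2⟩
    · rw [if_neg hc] at h
      obtain ⟨d, t, rfl, hd, hs, ht⟩ := ih (acc ++ [c]) h
      exact ⟨c :: d, t, by simp, by simp [List.mem_cons, hd]; exact fun h' => hc h'.symm,
             by simpa using hs, ht⟩

lemma scanSeg_decomp (rest : List Char) (h : scanSeg rest = true) (hm : '[' ∈ rest) :
    ∃ s d t, rest = s ++ '[' :: (d ++ ']' :: t) ∧ '[' ∉ s ∧ ']' ∉ s ∧ ']' ∉ d ∧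
      (PySem.Int.ofChars? d).isSome ∧ scanSeg t = true := by
  induction rest with
  | nil => simp at hm
  | cons c r ih =>
    rw [scanSeg] at h
    by_cases hc : c = '['
    · rw [if_pos hc] at h
      obtain ⟨d, t, rfl, hd, hs, ht⟩ := scanGrp_decomp _ _ h
      exact ⟨[], d, t, by simp [hc], by simp, by simp, hd, by simpa using hs, ht⟩
    · rw [if_neg hc] at h
      by_cases hc2 : c = ']'
      · rw [if_pos hc2] at h
        have := scanTail_no_bracket _ h
        rcases List.mem_cons.mp hm with he | he
        · exact absurd he.symm hc
        · exact absurd he this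
      · rw [if_neg hc2] at h
        rcases List.mem_cons.mp hm with he | he
        · exact absurd he.symm hc
        · obtain ⟨s, d, t, rfl, h1, h2, h3, h4, h5⟩ := ih h he
          exact ⟨c :: s, d, t, by simp, by simp [List.mem_cons, h1]; exact fun h' => hc h'.symm,
                 by simp [List.mem_cons, h2]; exact fun h' => hc2 h'.symm, h3, h4, h5⟩

lemma slice_from_lt (rest : List Char) (j : Int) (hj : ¬ j < 0) (hne : rest ≠ []) :
    (PySem.Chars.slice rest (some (j+1)) none).length < rest.length := by
  simp only [PySem.Chars.slice_eq_listSlice]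
  rw [PySem.List.slice_from rest (a := j + 1) (by omega)]
  have := List.length_pos_iff.mpr hne
  simp [List.length_drop]; omega

lemma parseB_dims (N : Nat) : ∀ (rest : List Char), rest.length ≤ N → ∀ base ds,
    parseB base rest ds = (parseB base rest []).map (fun p => (p.1, ds ++ p.2)) := by
  induction N with
  | zero =>
    intro rest hlen base ds
    have : rest = [] := by cases rest <;> simp_all
    subst this
    rw [parseB, parseB]
    have hin : ¬ PySem.Chars.isIn ['['] ([] : List Char) = true := by
      simp [PySem.Chars.isIn_iff_infix]
    rw [dif_neg hin, dif_neg hin]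
    simp
  | succ N ih =>
    intro rest hlen base ds
    rw [parseB, parseB]
    by_cases hin : PySem.Chars.isIn ['['] rest = true
    · rw [dif_pos hin, dif_pos hin]
      simp only
      by_cases hj : PySem.Chars.find rest [']'] < 0
      · rw [dif_pos hj, dif_pos hj]; rfl
      · rw [dif_neg hj, dif_neg hj]
        have hne : rest ≠ [] := by
          intro h; subst h
          obtain ⟨s, t, he⟩ := (PySem.Chars.isIn_iff_infix _ _).mp hin
          simp at he
        have hlt : (PySem.Chars.slice rest (some (PySem.Chars.find rest [']'] + 1)) none).length ≤ N := by
          have := slice_from_lt rest _ hj hne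
          omega
        cases h : PySem.Int.ofChars? (PySem.Chars.slice rest (some (PySem.Chars.find rest ['['] + 1)) (some (PySem.Chars.find rest [']']))) with
        | none => rfl
        | some d =>
          dsimp only
          rw [ih _ hlt _ (ds ++ [d]), ih _ hlt _ ([] ++ [d])]
          cases parseB (base ++ PySem.Chars.slice rest none (some (PySem.Chars.find rest ['[']))) (PySem.Chars.slice rest (some (PySem.Chars.find rest [']'] + 1)) none) [] with
          | none => rfl
          | some p => simp
    · rw [dif_neg hin, dif_neg hin]; simp

lemma pyRange_nonpos (k : Int) (h : k ≤ 0) : PySem.List.pyRange 0 k 1 = [] := by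
  simp [PySem.List.pyRange]; omega

lemma sepRun (X sep : List Char) (l : List Int) (K : Int) (hl : ∀ i ∈ l, i ≠ K) :
    ∀ acc, l.foldl (fun s i => if i ≠ K then s ++ X ++ sep else s ++ X) acc
      = acc ++ (List.replicate l.length (X ++ sep)).flatten := by
  induction l with
  | nil => simp
  | cons a l ih =>
    intro acc
    simp only [List.foldl_cons]
    rw [if_pos (hl a (by simp))]
    rw [ih (fun i hi => hl i (by simp [hi])) _]
    simp [List.replicate_succ]

lemma join_replicate (X sep : List Char) (m : Nat) :
    PySem.Chars.join sep (List.replicate (m+1) X)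
      = (List.replicate m (X ++ sep)).flatten ++ X := by
  induction m with
  | zero => simp [PySem.Chars.join_singleton]
  | succ m ih =>
    rw [show List.replicate (m+1+1) X = X :: X :: List.replicate m X by simp [List.replicate_succ]]
    rw [PySem.Chars.join_cons_cons]
    rw [show (X :: List.replicate m X) = List.replicate (m+1) X by simp [List.replicate_succ]]
    rw [ih]
    simp [List.replicate_succ]

lemma pyRange_len (m : Nat) : (PySem.List.pyRange 0 (m : Int) 1).length = m := by
  induction m with
  | zero => rw [pyRange_nonpos _ (by omega)]; rfl
  | succ m ih =>
    rw [show ((m+1 : Nat) : Int) = (m : Int) + 1 by push_cast; ring]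
    rw [PySem.List.pyRange_one_succ_right (by omega)]
    simp [ih]

lemma loopA_eq (k : Int) (X : List Char) :
    ((PySem.List.pyRange 0 k 1).foldl (fun s i =>
        if i ≠ k - 1 then s ++ X ++ [',', ' '] else s ++ X) ['[']) ++ [']'] = wrapDim X k := by
  by_cases hk : k ≤ 0
  · rw [pyRange_nonpos k hk]
    simp [wrapDim, show k.toNat = 0 by omega, PySem.Chars.join_nil]
  · obtain ⟨m, rfl⟩ : ∃ m : Nat, k = (m : Int) + 1 := ⟨(k-1).toNat, by omega⟩
    rw [PySem.List.pyRange_one_succ_right (by omega)]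
    rw [List.foldl_append]
    rw [sepRun X [',', ' '] (PySem.List.pyRange 0 (m : Int) 1) ((m : Int) + 1 - 1) (by
      intro i hi
      have := (PySem.List.mem_pyRange_one).mp hi
      omega)]
    simp only [List.foldl_cons, List.foldl_nil]
    rw [if_neg (by omega)]
    rw [pyRange_len]
    rw [wrapDim, show ((m : Int) + 1).toNat = m + 1 by omega, join_replicate]
    simp

lemma dvA_step (fuel : Nat) (p d t : List Char) (hp1 : '[' ∉ p) (hp2 : ']' ∉ p) (hpne : p ≠ [])
    (hd : ']' ∉ d) (k : Int) (hk : PySem.Int.ofChars? d = some k) :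
    dvAgo (fuel+1) (p ++ '[' :: (d ++ ']' :: t)) =
      ((PySem.List.pyRange 0 k 1).foldl (fun s i =>
          if i ≠ k - 1 then s ++ dvAgo fuel (p ++ t) ++ [',', ' '] else s ++ dvAgo fuel (p ++ t)) ['[']) ++ [']'] := by
  have hf1 : PySem.Chars.find (p ++ '[' :: (d ++ ']' :: t)) ['['] = (p.length : Int) :=
    find_char_eq p _ '[' hp1
  have hf2 : PySem.Chars.find (p ++ '[' :: (d ++ ']' :: t)) [']'] = ((p.length + 1 + d.length : Nat) : Int) := by
    rw [show p ++ '[' :: (d ++ ']' :: t) = (p ++ '[' :: d) ++ ']' :: t by simp]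
    rw [find_char_eq (p ++ '[' :: d) t ']' (by simp [hp2, hd])]
    simp; ring
  rw [dvAgo]
  simp only [hf1, hf2]
  rw [if_pos (by have := List.length_pos_iff.mpr hpne; exact_mod_cast Nat.cast_pos.mpr this)]
  simp only [PySem.Chars.slice_eq_listSlice]
  rw [PySem.List.slice_to_natCast, List.take_left]
  have e3 : ((p.length + 1 + d.length : Nat) : Int) + 1 = ((p.length + 1 + d.length + 1 : Nat) : Int) := by
    push_cast; ring
  have e5 : ((p.length : Nat) : Int) + 1 = ((p.length + 1 : Nat) : Int) := by push_cast; ring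
  have hdrop : PySem.List.slice (p ++ '[' :: (d ++ ']' :: t)) (some ((p.length + 1 + d.length + 1 : Nat) : Int)) none = t := by
    rw [PySem.List.slice_from_natCast]
    rw [show p ++ '[' :: (d ++ ']' :: t) = (p ++ '[' :: (d ++ [']'])) ++ t by simp]
    exact List.drop_left' (by simp; omega)
  have hcontent : PySem.List.slice (p ++ '[' :: (d ++ ']' :: t)) (some ((p.length + 1 : Nat) : Int)) (some ((p.length + 1 + d.length : Nat) : Int)) = d := by
    rw [PySem.List.slice_natCast]
    rw [show p ++ '[' :: (d ++ ']' :: t) = (p ++ ['[']) ++ (d ++ ']' :: t) by simp]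
    rw [List.drop_left' (by simp)]
    rw [show p.length + 1 + d.length - (p.length + 1) = d.length by omega]
    exact List.take_left
  rw [e3, hdrop, e5, hcontent, hk]

lemma parseB_step (base s d t : List Char) (dims : List Int) (hs1 : '[' ∉ s) (hs2 : ']' ∉ s)
    (hd : ']' ∉ d) (k : Int) (hk : PySem.Int.ofChars? d = some k) :
    parseB base (s ++ '[' :: (d ++ ']' :: t)) dims = parseB (base ++ s) t (dims ++ [k]) := by
  have hin : PySem.Chars.isIn ['['] (s ++ '[' :: (d ++ ']' :: t)) = true :=
    (isIn_singleton_iff _ _).mpr (by simp)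
  have hfj : PySem.Chars.find (s ++ '[' :: (d ++ ']' :: t)) [']'] = ((s.length + 1 + d.length : Nat) : Int) := by
    rw [show s ++ '[' :: (d ++ ']' :: t) = (s ++ '[' :: d) ++ ']' :: t by simp]
    rw [find_char_eq (s ++ '[' :: d) t ']' (by simp [hs2, hd])]
    simp; ring
  have hfk : PySem.Chars.find (s ++ '[' :: (d ++ ']' :: t)) ['['] = (s.length : Int) :=
    find_char_eq s _ '[' hs1
  rw [parseB, dif_pos hin]
  simp only [hfj, hfk, PySem.Chars.slice_eq_listSlice]
  rw [dif_neg (by push_cast; omega)]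
  have e5 : ((s.length : Nat) : Int) + 1 = ((s.length + 1 : Nat) : Int) := by push_cast; ring
  have hcontent : PySem.List.slice (s ++ '[' :: (d ++ ']' :: t)) (some ((s.length + 1 : Nat) : Int)) (some ((s.length + 1 + d.length : Nat) : Int)) = d := by
    rw [PySem.List.slice_natCast]
    rw [show s ++ '[' :: (d ++ ']' :: t) = (s ++ ['[']) ++ (d ++ ']' :: t) by simp]
    rw [List.drop_left' (by simp)]
    rw [show s.length + 1 + d.length - (s.length + 1) = d.length by omega]
    exact List.take_left
  have e3 : ((s.length + 1 + d.length : Nat) : Int) + 1 = ((s.length + 1 + d.length + 1 : Nat) : Int) := by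
    push_cast; ring
  have hdrop : PySem.List.slice (s ++ '[' :: (d ++ ']' :: t)) (some ((s.length + 1 + d.length + 1 : Nat) : Int)) none = t := by
    rw [PySem.List.slice_from_natCast]
    rw [show s ++ '[' :: (d ++ ']' :: t) = (s ++ '[' :: (d ++ [']'])) ++ t by simp]
    exact List.drop_left' (by simp; omega)
  have htake : PySem.List.slice (s ++ '[' :: (d ++ ']' :: t)) none (some ((s.length : Nat) : Int)) = s := by
    rw [PySem.List.slice_to_natCast]
    exact List.take_left
  rw [e5, hcontent, hk, e3, hdrop, htake]

lemma mainEq (fuel : Nat) : ∀ (base rest : List Char), base ≠ [] → '[' ∉ base → ']' ∉ base →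
    scanSeg rest = true → rest.length < fuel →
    ∃ b ds, parseB base rest [] = some (b, ds) ∧
      dvAgo fuel (base ++ rest) = ds.reverse.foldl wrapDim (dvScalar b) := by
  induction fuel with
  | zero => intro base rest _ _ _ _ h; omega
  | succ fuel ih =>
    intro base rest hbne hb1 hb2 hscan hlen
    by_cases hm : '[' ∈ rest
    · obtain ⟨s, d, t, rfl, hs1, hs2, hd, hsome, ht⟩ := scanSeg_decomp rest hscan hm
      obtain ⟨k, hk⟩ := Option.isSome_iff_exists.mp hsome
      have hstep := parseB_step base s d t [] hs1 hs2 hd k hk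
      have hlt : t.length < fuel := by simp at hlen; omega
      obtain ⟨b, ds, hp, hv⟩ := ih (base ++ s) t (by simp [hbne]) (by simp [hb1, hs1])
        (by simp [hb2, hs2]) ht hlt
      refine ⟨b, k :: ds, ?_, ?_⟩
      · rw [hstep, parseB_dims t.length t le_rfl, hp]
        rfl
      · rw [show base ++ (s ++ '[' :: (d ++ ']' :: t)) = (base ++ s) ++ '[' :: (d ++ ']' :: t) by simp]
        rw [dvA_step fuel (base ++ s) d t (by simp [hb1, hs1]) (by simp [hb2, hs2])
          (by simp [hbne]) hd k hk]
        rw [loopA_eq]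
        rw [show (k :: ds).reverse = ds.reverse ++ [k] by simp]
        rw [List.foldl_append]
        simp only [List.foldl_cons, List.foldl_nil]
        rw [← hv]
    · have hnin : ¬ PySem.Chars.isIn ['['] rest = true := by
        rw [isIn_singleton_iff]; exact hm
      refine ⟨base ++ rest, [], ?_, ?_⟩
      · rw [parseB, dif_neg hnin]
      · rw [dvAgo]
        rw [find_char_neg _ '[' (by simp [hb1, hm]), if_neg (by omega)]
        rfl

-- ===== VERDICT (by name: the statement is the Claim_ definition above) =====
theorem default_value_py_spec : Claim_equal_default_value_py := by
  unfold Claim_equal_default_value_py Spec_default_value_py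
  intro n _ hpre
  unfold default_value_py default_value_py_alt
  by_cases hgt : PySem.Chars.find n.toList ['['] > 0
  case neg =>
    rw [if_pos (by omega : PySem.Chars.find n.toList ['['] ≤ 0)]
    rw [dvAgo, if_neg hgt]
    rfl
  case pos =>
    have hm : '[' ∈ n.toList := by
      have h1 : PySem.Chars.find n.toList ['['] ≠ -1 := by omega
      obtain ⟨x, y, he⟩ := (PySem.Chars.find_ne_neg_one_iff _ _).mp h1
      rw [← he]; simp
    have hscan : scanSeg n.toList = true := by
      cases hpre with
      | inl h =>
        exfalso
        obtain ⟨r, hr⟩ : ∃ r, n.toList = '[' :: r := by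
          cases hc : n.toList with
          | nil => rw [hc] at h; simp at h
          | cons c r => rw [hc] at h; simp at h; exact ⟨r, by rw [h]⟩
        rw [hr, show ('[' :: r : List Char) = [] ++ '[' :: r by simp,
          find_char_eq [] r '[' (by simp)] at hgt
        simp at hgt
      | inr h => exact h
    obtain ⟨s, d, t, hdec, hs1, hs2, hd, hsome, ht⟩ := scanSeg_decomp n.toList hscan hm
    have hfind : PySem.Chars.find n.toList ['['] = (s.length : Int) := by
      rw [hdec]; exact find_char_eq s _ '[' hs1
    have hsne : s ≠ [] := by
      intro h; subst h; rw [hfind] at hgt; simp at hgt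
    rw [if_neg (by omega)]
    have htake : PySem.Chars.slice n.toList none (some (PySem.Chars.find n.toList ['['])) = s := by
      rw [hfind, hdec]
      simp only [PySem.Chars.slice_eq_listSlice]
      rw [PySem.List.slice_to_natCast]
      exact List.take_left
    have hdropp : PySem.Chars.slice n.toList (some (PySem.Chars.find n.toList ['['])) none = '[' :: (d ++ ']' :: t) := by
      rw [hfind, hdec]
      simp only [PySem.Chars.slice_eq_listSlice]
      rw [PySem.List.slice_from_natCast]
      exact List.drop_left
    rw [htake, hdropp]
    have hscanrest : scanSeg ('[' :: (d ++ ']' :: t)) = true := by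
      rw [hdec] at hscan
      rwa [scanSeg_clean_prefix s _ hs1 hs2] at hscan
    obtain ⟨b, ds, hp, hv⟩ := mainEq (n.toList.length + 1) s ('[' :: (d ++ ']' :: t)) hsne hs1 hs2
      hscanrest (by rw [hdec]; simp)
    rw [← hdec] at hv
    rw [hp, hv]
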